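-- pv_equiv track=rewrite | github.com/Egraf99/Running_line | symbols.py | from_bottom_to_up_with_center
-- ===== SOURCE A (Python) =====
-- def from_bottom_to_up_with_center(pix_column: list, height: int, symbol_id, order_col) -> list:
--     for h in range(height):
--         if order_col <= height // 2:
--             if h == (height - order_col):
--                 pix_column.append(symbol_id[0])
--             else:
--                 pix_column.append(0)
--         else:
--             if h == (height - order_col):
--                 pix_column.append(symbol_id[0])
--             elif h == height // 2:
--                 pix_column.append(symbol_id[1])
--             else:
--                 pix_column.append(0)
--     return pix_column
-- ===== SOURCE B (Python) =====
-- def from_bottom_to_up_with_center(pix_column: list, height: int, symbol_id, order_col) -> list: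
--     # Direct index computation instead of a per-row branching loop.
--     start = len(pix_column)
--     n = height if height > 0 else 0
--     pix_column.extend([0] * n)
--     pos = height - order_col
--     mid = height // 2
--     if order_col > mid and n > 0 and mid != pos:
--         pix_column[start + mid] = symbol_id[1]
--     if 0 <= pos < n:
--         pix_column[start + pos] = symbol_id[0]
--     return pix_column
-- ===== Notes on version B (the rewrite author's own statement) =====
-- stated objective: simpler
-- what changed: Replaces the per-row branching loop with direct index computation: extend with zeros once, then write symbol_id[1] at the middle (when applicable) and symbol_id[0] at height-order_col by index assignment.
import Mathlib
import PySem

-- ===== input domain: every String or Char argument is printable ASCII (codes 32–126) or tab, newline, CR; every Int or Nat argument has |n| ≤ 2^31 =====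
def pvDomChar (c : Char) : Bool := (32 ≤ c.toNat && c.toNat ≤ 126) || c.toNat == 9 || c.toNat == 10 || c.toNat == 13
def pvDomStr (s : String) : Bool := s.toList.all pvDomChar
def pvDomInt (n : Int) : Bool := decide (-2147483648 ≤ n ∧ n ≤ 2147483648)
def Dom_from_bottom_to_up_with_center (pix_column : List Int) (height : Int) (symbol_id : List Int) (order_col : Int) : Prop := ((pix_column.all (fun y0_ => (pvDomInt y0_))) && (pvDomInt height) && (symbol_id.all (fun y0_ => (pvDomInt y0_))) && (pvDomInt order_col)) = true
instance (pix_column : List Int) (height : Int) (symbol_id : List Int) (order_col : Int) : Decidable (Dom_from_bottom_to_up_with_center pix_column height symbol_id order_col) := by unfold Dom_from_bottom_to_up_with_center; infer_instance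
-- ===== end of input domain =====

-- B writes the two marked cells by direct index computation instead of A's per-row branching loop (objective: simpler).
-- Both Pythons mutate pix_column in place by appending; the equivalence proved here is about the return value.

-- ===== PORT A =====
-- symbol_id[0] / symbol_id[1]; under Pre_ the index is in range wherever the value is used, so getD 0 is exact there
def pvSym (symbol_id : List Int) (i : Int) : Int := (PySem.List.pyGet? symbol_id i).getD 0

def from_bottom_to_up_with_center (pix_column : List Int) (height : Int) (symbol_id : List Int) (order_col : Int) : List Int :=
  (PySem.List.pyRange 0 height 1).foldl (fun acc h =>
    if order_col ≤ PySem.Int.floordiv height 2 then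
      if h = height - order_col then acc ++ [pvSym symbol_id 0] else acc ++ [0]
    else
      if h = height - order_col then acc ++ [pvSym symbol_id 0]
      else if h = PySem.Int.floordiv height 2 then acc ++ [pvSym symbol_id 1]
      else acc ++ [0]) pix_column

-- ===== PORT B =====
def from_bottom_to_up_with_center_alt (pix_column : List Int) (height : Int) (symbol_id : List Int) (order_col : Int) : List Int :=
  let start := pix_column.length
  let n : Int := if height > 0 then height else 0
  let base := pix_column ++ List.replicate n.toNat 0
  let pos := height - order_col
  let mid := PySem.Int.floordiv height 2
  let base2 := if mid < order_col ∧ 0 < n ∧ mid ≠ pos then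
      base.set (start + mid.toNat) (pvSym symbol_id 1) else base
  if 0 ≤ pos ∧ pos < n then base2.set (start + pos.toNat) (pvSym symbol_id 0) else base2

-- ===== PRECONDITION & SPEC =====
-- Pre_ excludes exactly the inputs on which the Python A raises IndexError: symbol_id too short
-- at a moment one of its elements is actually read (B raises on exactly the same inputs).
def Pre_from_bottom_to_up_with_center (pix_column : List Int) (height : Int) (symbol_id : List Int) (order_col : Int) : Prop :=
  (0 ≤ height - order_col ∧ height - order_col < height → symbol_id ≠ []) ∧
  (0 < height ∧ PySem.Int.floordiv height 2 < order_col ∧ height - order_col ≠ PySem.Int.floordiv height 2 → 2 ≤ symbol_id.length)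
instance (pix_column : List Int) (height : Int) (symbol_id : List Int) (order_col : Int) : Decidable (Pre_from_bottom_to_up_with_center pix_column height symbol_id order_col) := by unfold Pre_from_bottom_to_up_with_center; infer_instance
def pvWitness_from_bottom_to_up_with_center : List Int × Int × List Int × Int := ([7], 5, [8, 9], 2)

def Spec_from_bottom_to_up_with_center (pix_column : List Int) (height : Int) (symbol_id : List Int) (order_col : Int) (out : List Int) : Prop := out = from_bottom_to_up_with_center_alt pix_column height symbol_id order_col
instance (pix_column : List Int) (height : Int) (symbol_id : List Int) (order_col : Int) (out : List Int) : Decidable (Spec_from_bottom_to_up_with_center pix_column height symbol_id order_col out) := by unfold Spec_from_bottom_to_up_with_center; infer_instance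

-- ===== CLAIM (what is proved, stated in full; the proofs are below) =====
def Claim_equal_from_bottom_to_up_with_center : Prop := ∀ (pix_column : List Int) (height : Int) (symbol_id : List Int) (order_col : Int), Dom_from_bottom_to_up_with_center pix_column height symbol_id order_col → Pre_from_bottom_to_up_with_center pix_column height symbol_id order_col → Spec_from_bottom_to_up_with_center pix_column height symbol_id order_col (from_bottom_to_up_with_center pix_column height symbol_id order_col)

-- ===== LEMMAS AND PROOFS =====

-- A's loop appends exactly one cell per row: result = pix_column ++ the row map
theorem pv_foldA (pix_column : List Int) (height : Int) (symbol_id : List Int) (order_col : Int) :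
    from_bottom_to_up_with_center pix_column height symbol_id order_col =
      pix_column ++ (PySem.List.pyRange 0 height 1).map (fun h =>
        if order_col ≤ PySem.Int.floordiv height 2 then
          (if h = height - order_col then pvSym symbol_id 0 else 0)
        else if h = height - order_col then pvSym symbol_id 0
        else if h = PySem.Int.floordiv height 2 then pvSym symbol_id 1
        else 0) := by
  unfold from_bottom_to_up_with_center
  have hbody : (fun (acc : List Int) (h : Int) =>
      if order_col ≤ PySem.Int.floordiv height 2 then
        if h = height - order_col then acc ++ [pvSym symbol_id 0] else acc ++ [0]
      else
        if h = height - order_col then acc ++ [pvSym symbol_id 0]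
        else if h = PySem.Int.floordiv height 2 then acc ++ [pvSym symbol_id 1]
        else acc ++ [0]) =
      (fun (acc : List Int) (h : Int) => acc ++ [
        if order_col ≤ PySem.Int.floordiv height 2 then
          (if h = height - order_col then pvSym symbol_id 0 else 0)
        else if h = height - order_col then pvSym symbol_id 0
        else if h = PySem.Int.floordiv height 2 then pvSym symbol_id 1
        else 0]) := by
    funext acc h
    split_ifs <;> rfl
  rw [hbody, PySem.List.foldl_append_singleton_eq_map]

-- setting a cell of the appended suffix
theorem pv_set_append (pc l : List Int) (a : Int) (i : Nat) :
    (pc ++ l).set (pc.length + i) a = pc ++ l.set i a := by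
  rw [List.set_append_right _ _ (by omega), Nat.add_sub_cancel_left]

theorem from_bottom_to_up_with_center_spec : Claim_equal_from_bottom_to_up_with_center := by
  intro pc height sid oc _hdom _hpre
  unfold Spec_from_bottom_to_up_with_center
  rw [pv_foldA]
  unfold from_bottom_to_up_with_center_alt
  by_cases hpos : (0 : Int) < height
  · have hm2 : PySem.Int.floordiv height 2 = height / 2 :=
      PySem.Int.floordiv_eq_ediv_of_pos (by omega)
    simp only [hm2, gt_iff_lt, if_pos hpos]
    by_cases h1 : height / 2 < oc ∧ (0:Int) < height ∧ height / 2 ≠ height - oc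
    · by_cases h2 : ((0:Int) ≤ height - oc ∧ height - oc < height)
      · rw [if_pos h1, if_pos h2, pv_set_append, pv_set_append]
        congr 1
        apply List.ext_getElem
        · simp only [List.length_map, PySem.List.length_pyRange_one, sub_zero,
            List.length_set, List.length_replicate]
        · intro i hi _
          have hilen : i < (height - 0).toNat := by simpa using hi
          simp only [List.getElem_map, PySem.List.getElem_pyRange_one, zero_add,
            List.getElem_set, List.getElem_replicate]
          split_ifs <;> first | rfl | omega
      · rw [if_pos h1, if_neg h2, pv_set_append]
        congr 1
        apply List.ext_getElem
        · simp only [List.length_map, PySem.List.length_pyRange_one, sub_zero,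
            List.length_set, List.length_replicate]
        · intro i hi _
          have hilen : i < (height - 0).toNat := by simpa using hi
          simp only [List.getElem_map, PySem.List.getElem_pyRange_one, zero_add,
            List.getElem_set, List.getElem_replicate]
          split_ifs <;> first | rfl | omega
    · by_cases h2 : ((0:Int) ≤ height - oc ∧ height - oc < height)
      · rw [if_neg h1, if_pos h2, pv_set_append]
        congr 1
        apply List.ext_getElem
        · simp only [List.length_map, PySem.List.length_pyRange_one, sub_zero,
            List.length_set, List.length_replicate]
        · intro i hi _
          have hilen : i < (height - 0).toNat := by simpa using hi
          have h1' : ¬(height / 2 < oc) ∨ height / 2 = height - oc := by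
            rcases not_and_or.mp h1 with h | h
            · exact Or.inl h
            · rcases not_and_or.mp h with h | h
              · exact absurd hpos h
              · exact Or.inr (not_not.mp h)
          simp only [List.getElem_map, PySem.List.getElem_pyRange_one, zero_add,
            List.getElem_set, List.getElem_replicate]
          rcases h1' with h1' | h1' <;> split_ifs <;> first | rfl | omega
      · rw [if_neg h1, if_neg h2]
        congr 1
        apply List.ext_getElem
        · simp only [List.length_map, PySem.List.length_pyRange_one, sub_zero,
            List.length_replicate]
        · intro i hi _
          have hilen : i < (height - 0).toNat := by simpa using hi
          have h1' : ¬(height / 2 < oc) ∨ height / 2 = height - oc := by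
            rcases not_and_or.mp h1 with h | h
            · exact Or.inl h
            · rcases not_and_or.mp h with h | h
              · exact absurd hpos h
              · exact Or.inr (not_not.mp h)
          simp only [List.getElem_map, PySem.List.getElem_pyRange_one, zero_add,
            List.getElem_replicate]
          rcases h1' with h1' | h1' <;> split_ifs <;> first | rfl | omega
  · have hz : height.toNat = 0 := by omega
    have hr : PySem.List.pyRange 0 height 1 = [] := by
      rw [PySem.List.pyRange_one]
      simp
      omega
    simp [hr, hpos, hz]
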